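-- pv_equiv track=rewrite | github.com/Jan-PieterK/health-level-seven | src/converter.py | data_to_hl7
-- ===== SOURCE A (Python) =====
-- from typing import Dict, List, Tuple
--
-- def data_to_hl7(hl7_data: Dict[str, List[List[str]]]) -> str:
--     message = ''
--     for segment_name, segment_data in hl7_data.items():
--         segment_value = "|".join(
--             ["^".join(
--                 ["&".join(
--                     [l3 or '' for l3 in l2 or []]
--                 ) for l2 in l1 or []]
--             ) for l1 in segment_data]
--         )
--         message += f'{segment_name}|{segment_value}\n'
--     return message
-- ===== SOURCE B (Python) =====
-- def _render(node, seps):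
--     if not seps:
--         return node or ''
--     return seps[0].join(_render(child, seps[1:]) for child in (node or []))
--
--
-- def data_to_hl7(hl7_data):
--     lines = []
--     for segment_name, segment_data in hl7_data.items():
--         lines.append(segment_name + "|"
--                      + "|".join(_render(l1, "^&") for l1 in segment_data)
--                      + "\n")
--     return "".join(lines)
-- ===== Notes on version B (the rewrite author's own statement) =====
-- stated objective: idiomatic
-- what changed: Replaces the triple-nested list comprehensions and string accumulation with a single recursive render(node, seps) helper over the separator list plus a final ''.join of per-segment lines.
import Mathlib
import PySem

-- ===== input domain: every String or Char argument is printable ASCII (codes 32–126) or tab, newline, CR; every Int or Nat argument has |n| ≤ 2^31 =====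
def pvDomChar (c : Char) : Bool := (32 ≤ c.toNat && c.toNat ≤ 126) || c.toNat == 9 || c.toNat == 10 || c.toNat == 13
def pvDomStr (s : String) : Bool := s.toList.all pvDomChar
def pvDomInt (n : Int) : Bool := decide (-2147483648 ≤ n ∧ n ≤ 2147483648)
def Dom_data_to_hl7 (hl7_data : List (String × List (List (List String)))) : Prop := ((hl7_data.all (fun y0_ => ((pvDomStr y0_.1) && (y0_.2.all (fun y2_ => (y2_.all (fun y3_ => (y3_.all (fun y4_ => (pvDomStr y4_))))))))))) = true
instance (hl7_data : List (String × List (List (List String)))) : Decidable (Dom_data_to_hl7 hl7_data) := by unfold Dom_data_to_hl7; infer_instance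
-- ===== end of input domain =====

-- B replaces A's triple-nested comprehensions + string accumulation by a recursive
-- render-over-separators helper and a final join of per-segment lines (idiomatic; same cost).

-- ===== PORT A =====
-- Python's 'l2 or []' / 'l1 or []' are identities here (an empty list stays empty),
-- and 'l3 or ""' is the identity on String; ported as the plain maps.
def data_to_hl7 (hl7_data : List (String × List (List (List String)))) : String :=
  hl7_data.foldl (fun message seg =>
    let segment_value := PySem.Str.join "|" (seg.2.map (fun l1 =>
      PySem.Str.join "^" (l1.map (fun l2 =>
        PySem.Str.join "&" (l2.map (fun l3 => l3))))))
    message ++ (seg.1 ++ "|" ++ segment_value ++ "\n")) ""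

-- ===== PORT B =====
-- Source B's generic _render(node, seps) recurses on the static separator string "^&";
-- Lean is typed, so that recursion is transcribed as one function per level
-- (leaf = 'node or ""' = identity on String; each level = sep.join of the rendered children).
def pvRenderLeaf (node : String) : String := node
def pvRenderAmp (node : List String) : String :=
  PySem.Str.join "&" (node.map pvRenderLeaf)
def pvRenderCaret (node : List (List String)) : String :=
  PySem.Str.join "^" (node.map pvRenderAmp)

def data_to_hl7_alt (hl7_data : List (String × List (List (List String)))) : String :=
  PySem.Str.join "" (hl7_data.map (fun seg =>
    seg.1 ++ "|" ++ PySem.Str.join "|" (seg.2.map pvRenderCaret) ++ "\n"))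

-- ===== PRECONDITION & SPEC =====
def Spec_data_to_hl7 (hl7_data : List (String × List (List (List String)))) (out : String) : Prop := out = data_to_hl7_alt hl7_data
instance (hl7_data : List (String × List (List (List String)))) (out : String) : Decidable (Spec_data_to_hl7 hl7_data out) := by unfold Spec_data_to_hl7; infer_instance

-- ===== CLAIM (what is proved, stated in full; the proofs are below) =====
def Claim_equal_data_to_hl7 : Prop := ∀ (hl7_data : List (String × List (List (List String)))), Dom_data_to_hl7 hl7_data → Spec_data_to_hl7 hl7_data (data_to_hl7 hl7_data)

-- ===== LEMMAS AND PROOFS =====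

lemma pv_intercalate_nil (ls : List (List Char)) :
    ([] : List Char).intercalate ls = ls.flatten := by
  induction ls with
  | nil => rfl
  | cons a as ih =>
    cases as with
    | nil => simp [List.intercalate]
    | cons b bs => simp_all [List.intercalate, List.intersperse]

lemma pv_join_nil_cons (s : String) (ls : List String) :
    PySem.Str.join "" (s :: ls) = s ++ PySem.Str.join "" ls := by
  simp [PySem.Str.join, PySem.Chars.join, pv_intercalate_nil]

lemma pv_foldl_join {α : Type} (f : α → String) :
    ∀ (l : List α) (acc : String),
      l.foldl (fun m x => m ++ f x) acc = acc ++ PySem.Str.join "" (l.map f) := by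
  intro l
  induction l with
  | nil => intro acc; simp [PySem.Str.join, PySem.Chars.join, pv_intercalate_nil]
  | cons h t ih =>
    intro acc
    simp only [List.foldl, List.map, pv_join_nil_cons, ih, String.append_assoc]

-- ===== VERDICT (by name: the statement is the Claim_ definition above) =====
theorem data_to_hl7_spec : Claim_equal_data_to_hl7 := by
  intro hl7_data _
  unfold Spec_data_to_hl7 data_to_hl7 data_to_hl7_alt pvRenderCaret pvRenderAmp pvRenderLeaf
  rw [pv_foldl_join
    (f := fun seg : String × List (List (List String)) =>
      seg.1 ++ "|" ++ PySem.Str.join "|" (seg.2.map (fun l1 =>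
        PySem.Str.join "^" (l1.map (fun l2 =>
          PySem.Str.join "&" (l2.map (fun l3 => l3)))))) ++ "\n")]
  simp [String.append_assoc]
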